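-- pv_equiv track=rewrite | github.com/gareth53/exercise | exercises/highest_product.py | get_highest_product
-- ===== SOURCE A (Python) =====
-- def get_highest_product(numbers):
-- 	"""
-- 	returns the highest product of three numbers in a list
-- 	the dumb, brute-force way
-- 	"""
-- 	output = None
--
-- 	for x, num1 in enumerate(numbers):
-- 		for y, num2 in enumerate(numbers):
-- 			for z, num3 in enumerate(numbers):
-- 				if x != y and x != z and y != z:
-- 					product = num1*num2*num3
-- 					if not output or product > output:
-- 						output = product
-- 	return output
-- ===== SOURCE B (Python) =====
-- def get_highest_product(numbers):
--     """
--     returns the highest product of three numbers in a list: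
--     sort once, then the best is either the three largest
--     or the two smallest (most negative) times the largest
--     """
--     if len(numbers) < 3:
--         return None
--     s = sorted(numbers)
--     return max(s[-1] * s[-2] * s[-3], s[0] * s[1] * s[-1])
-- ===== Notes on version B (the rewrite author's own statement) =====
-- stated objective: faster
-- what changed: Replaces the O(n^3) triple loop with a truthiness-buggy running maximum by a single sort followed by a constant-time comparison of the two candidate products (three largest vs two smallest times the largest).
-- intended difference: On lists of length >= 3 that contain a 0 but admit no positive triple product and whose last three elements are all nonzero, A's 'if not output' treats the correct running maximum 0 as falsy and overwrites it, returning a negative product (e.g. -1 on [0,-1,-1,-1]); B returns the intended maximum 0. — e.g. on get_highest_product([0, -1, -1, -1]): A returns some (-1), B returns some 0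
import Mathlib
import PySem

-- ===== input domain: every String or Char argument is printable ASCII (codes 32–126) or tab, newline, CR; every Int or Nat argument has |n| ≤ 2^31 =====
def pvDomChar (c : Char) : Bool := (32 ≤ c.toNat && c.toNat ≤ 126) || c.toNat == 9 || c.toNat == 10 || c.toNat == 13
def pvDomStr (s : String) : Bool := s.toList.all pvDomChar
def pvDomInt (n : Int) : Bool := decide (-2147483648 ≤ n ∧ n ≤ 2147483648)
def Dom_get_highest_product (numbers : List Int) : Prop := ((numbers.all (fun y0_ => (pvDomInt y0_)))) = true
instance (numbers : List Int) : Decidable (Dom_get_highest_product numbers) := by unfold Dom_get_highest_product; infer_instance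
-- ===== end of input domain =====

-- B replaces A's O(n^3) brute-force triple loop (whose running maximum treats an
-- accumulated 0 as falsy) by one sort and a comparison of the two candidate products;
-- on the D_ inputs below A returns a wrong negative value and B returns the intended 0.


-- ===== PORT A =====
-- 'if not output or product > output': 'not output' is true for None AND for 0
def ghpUpd (output : Option Int) (product : Int) : Option Int :=
  match output with
  | none => some product
  | some v => if v = 0 ∨ product > v then some product else some v

def get_highest_product (numbers : List Int) : Option Int :=
  (PySem.List.enumerate numbers).foldl (fun output xp =>
    (PySem.List.enumerate numbers).foldl (fun output yp =>
      (PySem.List.enumerate numbers).foldl (fun output zp =>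
        if xp.1 ≠ yp.1 ∧ xp.1 ≠ zp.1 ∧ yp.1 ≠ zp.1 then
          ghpUpd output (xp.2 * yp.2 * zp.2)
        else output) output) output) none

-- ===== PORT B =====
-- indices -1,-2,-3,0,1 are all in range because 3 ≤ len, so pyGetD is exact here
def get_highest_product_alt (numbers : List Int) : Option Int :=
  if numbers.length < 3 then none
  else
    let s := PySem.List.sorted numbers (fun x => x) false
    some (max (PySem.List.pyGetD s (-1) 0 * PySem.List.pyGetD s (-2) 0 * PySem.List.pyGetD s (-3) 0)
              (PySem.List.pyGetD s 0 0 * PySem.List.pyGetD s 1 0 * PySem.List.pyGetD s (-1) 0))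

-- ===== PRECONDITION & SPEC =====
-- On lists of length ≥ 3 that contain a 0 but admit no positive triple product and whose
-- last three elements are all nonzero, A's 'if not output' treats the correct running
-- maximum 0 as falsy and overwrites it, returning a negative product; B returns the
-- intended maximum 0.
def D_get_highest_product (numbers : List Int) : Prop :=
  3 ≤ numbers.length ∧ (0 : Int) ∈ numbers ∧
  numbers.countP (fun a => decide (0 < a)) < 3 ∧
  (numbers.countP (fun a => decide (0 < a)) = 0 ∨ numbers.countP (fun a => decide (a < 0)) < 2) ∧
  (0 : Int) ∉ numbers.drop (numbers.length - 3)
instance (numbers : List Int) : Decidable (D_get_highest_product numbers) := by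
  unfold D_get_highest_product; infer_instance

def Spec_get_highest_product (numbers : List Int) (out : Option Int) : Prop :=
  ¬ D_get_highest_product numbers → out = get_highest_product_alt numbers
instance (numbers : List Int) (out : Option Int) : Decidable (Spec_get_highest_product numbers out) := by
  unfold Spec_get_highest_product; infer_instance

def pvDiffWitness_get_highest_product : List Int := [0, -1, -1, -1]
def pvDiffWitnessOut_get_highest_product : (Option Int) × (Option Int) := (some (-1), some 0)

-- ===== CLAIM (what is proved, stated in full; the proofs are below) =====
def Claim_unchanged_get_highest_product : Prop := ∀ (numbers : List Int), Dom_get_highest_product numbers → Spec_get_highest_product numbers (get_highest_product numbers)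
def Claim_changed_get_highest_product : Prop := Dom_get_highest_product (pvDiffWitness_get_highest_product) ∧ D_get_highest_product (pvDiffWitness_get_highest_product) ∧ get_highest_product (pvDiffWitness_get_highest_product) = pvDiffWitnessOut_get_highest_product.1 ∧ get_highest_product_alt (pvDiffWitness_get_highest_product) = pvDiffWitnessOut_get_highest_product.2 ∧ pvDiffWitnessOut_get_highest_product.1 ≠ pvDiffWitnessOut_get_highest_product.2
def Claim_exact_get_highest_product : Prop := ∀ (numbers : List Int), Dom_get_highest_product numbers → D_get_highest_product numbers → get_highest_product numbers ≠ get_highest_product_alt numbers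

-- ===== LEMMAS AND PROOFS =====

-- the products of A's loop, in A's loop order
def ghpProds (l : List Int) : List Int :=
  (PySem.List.enumerate l).flatMap (fun xp =>
    (PySem.List.enumerate l).flatMap (fun yp =>
      (PySem.List.enumerate l).filterMap (fun zp =>
        if xp.1 ≠ yp.1 ∧ xp.1 ≠ zp.1 ∧ yp.1 ≠ zp.1 then some (xp.2 * yp.2 * zp.2) else none)))

theorem ghp_eq_foldl (l : List Int) :
    get_highest_product l = (ghpProds l).foldl ghpUpd none := by
  unfold get_highest_product ghpProds
  rw [List.foldl_flatMap]
  apply List.foldl_ext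
  intro acc xp _
  rw [List.foldl_flatMap]
  apply List.foldl_ext
  intro acc' yp _
  rw [List.foldl_filterMap]
  apply List.foldl_ext
  intro acc'' zp _
  split <;> rfl

theorem mem_ghpProds {l : List Int} {v : Int} :
    v ∈ ghpProds l ↔ ∃ (x y z : Nat) (hx : x < l.length) (hy : y < l.length) (hz : z < l.length),
      x ≠ y ∧ x ≠ z ∧ y ≠ z ∧ v = l[x] * l[y] * l[z] := by
  unfold ghpProds
  simp only [List.mem_flatMap, List.mem_filterMap, PySem.List.mem_enumerate_iff]
  constructor
  · rintro ⟨xp, ⟨x, hx, rfl⟩, yp, ⟨y, hy, rfl⟩, zp, ⟨z, hz, rfl⟩, hif⟩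
    split at hif
    · rename_i hg
      simp only [Option.some_inj] at hif
      refine ⟨x, y, z, hx, hy, hz, ?_, ?_, ?_, hif.symm⟩ <;> omega
    · simp at hif
  · rintro ⟨x, y, z, hx, hy, hz, hxy, hxz, hyz, rfl⟩
    refine ⟨(0 + (x:Int), l[x]), ⟨x, hx, rfl⟩, (0 + (y:Int), l[y]), ⟨y, hy, rfl⟩,
      (0 + (z:Int), l[z]), ⟨z, hz, rfl⟩, ?_⟩
    rw [if_pos (by refine ⟨?_, ?_, ?_⟩ <;> simp <;> omega)]

theorem ghpUpd_foldl_mem : ∀ (ps : List Int) (a : Option Int) (v : Int),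
    ps.foldl ghpUpd a = some v → a = some v ∨ v ∈ ps := by
  intro ps
  induction ps with
  | nil => intro a v h; exact Or.inl h
  | cons q tl ih =>
    intro a v h
    rcases ih (ghpUpd a q) v h with h' | h'
    · rcases a with _ | w
      · have : ghpUpd none q = some q := rfl
        rw [this] at h'
        simp at h'; simp [h']
      · have hdef : ghpUpd (some w) q = if w = 0 ∨ q > w then some q else some w := rfl
        rw [hdef] at h'
        split at h' <;> simp_all
    · simp [h']

theorem foldl_max_shift : ∀ (tl : List Int) (x y : Int),
    tl.foldl max (max x y) = max x (tl.foldl max y) := by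
  intro tl
  induction tl with
  | nil => intro x y; rfl
  | cons c tl ih =>
    intro x y
    simp only [List.foldl_cons]
    rw [max_assoc, ih]

theorem ghpUpd_foldl_pos : ∀ (ps : List Int) (v : Int), 0 < ps.foldl max v →
    ps.foldl ghpUpd (some v) = some (ps.foldl max v) := by
  intro ps
  induction ps with
  | nil => intro v h; rfl
  | cons q tl ih =>
    intro v h
    simp only [List.foldl_cons] at h ⊢
    have hsh : tl.foldl max (max v q) = max v (tl.foldl max q) := foldl_max_shift tl v q
    have hdef : ghpUpd (some v) q = if v = 0 ∨ q > v then some q else some v := rfl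
    by_cases hc : v = 0 ∨ q > v
    · rw [hdef, if_pos hc]
      rcases hc with hc | hc
      · subst hc
        have h' : 0 < tl.foldl max q := by
          rw [hsh] at h
          rcases le_or_gt (tl.foldl max q) 0 with h0 | h0
          · have := max_le (le_refl (0:Int)) h0; omega
          · exact h0
        rw [ih q h', hsh]
        have : max 0 (tl.foldl max q) = tl.foldl max q := max_eq_right (le_of_lt h')
        rw [this]
      · have hmax : max v q = q := max_eq_right (le_of_lt hc)
        rw [hmax] at h ⊢
        exact ih q h
    · push_neg at hc
      have hupd : ghpUpd (some v) q = some v := by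
        rw [hdef, if_neg (by push_neg; exact hc)]
      rw [hupd]
      have hmax : max v q = v := max_eq_left hc.2
      rw [hmax] at h ⊢
      exact ih v h

theorem ghpUpd_foldl_neg : ∀ (ps : List Int) (v : Int), v < 0 → (∀ p ∈ ps, p < 0) →
    ps.foldl ghpUpd (some v) = some (ps.foldl max v) := by
  intro ps
  induction ps with
  | nil => intro v _ _; rfl
  | cons q tl ih =>
    intro v hv hall
    have hq : q < 0 := hall q (by simp)
    simp only [List.foldl_cons]
    have hdef : ghpUpd (some v) q = if v = 0 ∨ q > v then some q else some v := rfl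
    have hupd : ghpUpd (some v) q = some (max v q) := by
      rw [hdef]
      by_cases hc : v = 0 ∨ q > v
      · rcases hc with hc | hc
        · omega
        · rw [if_pos (Or.inr hc), max_eq_right (le_of_lt hc)]
      · push_neg at hc
        rw [if_neg (by push_neg; exact hc), max_eq_left hc.2]
    rw [hupd]
    exact ih (max v q) (by rcases max_cases v q with ⟨h,_⟩|⟨h,_⟩ <;> omega)
      (fun p hp => hall p (by simp [hp]))

theorem ghpUpd_foldl_zero_last (u : List Int) (h : ∀ p ∈ u, p ≤ 0) :
    (u ++ [0]).foldl ghpUpd none = some 0 := by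
  rw [List.foldl_append]
  rcases hres : u.foldl ghpUpd none with _ | v
  · rfl
  · rcases ghpUpd_foldl_mem u none v hres with h' | h'
    · simp at h'
    · have hv : v ≤ 0 := h v h'
      simp only [List.foldl_cons, List.foldl_nil]
      have hdef : ghpUpd (some v) 0 = if v = 0 ∨ (0:Int) > v then some 0 else some v := rfl
      rw [hdef, if_pos (by omega)]

theorem ghpProds_getLast (l' : List Int) (a b c : Int) :
    (ghpProds (l' ++ [a, b, c])).getLast? = some (c * b * a) := by
  unfold ghpProds
  rw [List.getLast?_eq_head?_reverse]
  set m : Int := (l'.length : Int) with hm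
  have hE : PySem.List.enumerate (l' ++ [a, b, c]) 0 =
      PySem.List.enumerate l' 0 ++ [(m, a), (m + 1, b), (m + 2, c)] := by
    rw [PySem.List.enumerate_append]
    simp [PySem.List.enumerate_cons, PySem.List.enumerate_nil]
    constructor <;> omega
  have h1 : (m + 2 : Int) ≠ m + 1 := by omega
  have h2 : (m + 2 : Int) ≠ m := by omega
  have h3 : (m + 1 : Int) ≠ m := by omega
  rw [hE]
  rw [List.reverse_flatMap]
  rw [show (PySem.List.enumerate l' 0 ++ [(m, a), (m + 1, b), (m + 2, c)]).reverse
      = (m+2, c) :: (m+1, b) :: (m, a) :: (PySem.List.enumerate l' 0).reverse by simp]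
  rw [List.flatMap_cons, Function.comp]
  rw [List.reverse_flatMap]
  rw [show (PySem.List.enumerate l' 0 ++ [(m, a), (m + 1, b), (m + 2, c)]).reverse
      = (m+2, c) :: (m+1, b) :: (m, a) :: (PySem.List.enumerate l' 0).reverse by simp]
  rw [List.flatMap_cons, List.flatMap_cons]
  simp only [Function.comp_apply]
  rw [show (List.filterMap
        (fun zp => if (m + 2, c).1 ≠ ((m+2 : Int), c).1 ∧ (m + 2, c).1 ≠ zp.1 ∧ ((m+2 : Int), c).1 ≠ zp.1
          then some ((m + 2, c).2 * ((m+2:Int), c).2 * zp.2) else none)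
        (PySem.List.enumerate l' 0 ++ [(m, a), (m + 1, b), (m + 2, c)])) = ([] : List Int) by
      rw [List.filterMap_eq_nil_iff]; intro p _; simp]
  rw [List.reverse_nil, List.nil_append]
  rw [← List.filterMap_reverse]
  rw [show (PySem.List.enumerate l' 0 ++ [(m, a), (m + 1, b), (m + 2, c)]).reverse
      = (m+2, c) :: (m+1, b) :: (m, a) :: (PySem.List.enumerate l' 0).reverse by simp]
  rw [List.filterMap_cons, List.filterMap_cons, List.filterMap_cons]
  simp only [ne_eq, h1, h2, h3, not_false_eq_true, not_true_eq_false, and_false, false_and,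
    and_true, true_and, and_self, if_true, if_false, ite_true, ite_false, reduceIte]
  simp [List.head?_append]

theorem triple_sublist (l : List Int) (x y z : Nat) (hxy : x < y) (hyz : y < z)
    (hz : z < l.length) :
    [l[x]'(by omega), l[y]'(by omega), l[z]].Sublist l := by
  have h := List.map_getElem_sublist (l := l)
    (is := [⟨x, by omega⟩, ⟨y, by omega⟩, ⟨z, hz⟩])
    (by simp [List.pairwise_cons]; omega)
  simpa using h

theorem subperm_prod_mem {t l : List Int} (h : t.Subperm l) (hlen : t.length = 3) :
    t.prod ∈ ghpProds l := by
  obtain ⟨t', hperm, hsub⟩ := h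
  have hlen' : t'.length = 3 := by rw [hperm.length_eq, hlen]
  obtain ⟨is, hmap, hpw⟩ := List.sublist_eq_map_getElem hsub
  have hislen : is.length = 3 := by
    have := congrArg List.length hmap
    simp only [List.length_map] at this
    omega
  obtain ⟨i, j, k, rfl⟩ := List.length_eq_three.mp hislen
  rw [List.pairwise_cons, List.pairwise_cons] at hpw
  have hij : (i : Nat) < (j : Nat) := hpw.1 j (by simp)
  have hik : (i : Nat) < (k : Nat) := hpw.1 k (by simp)
  have hjk : (j : Nat) < (k : Nat) := hpw.2.1 k (by simp)
  have hprod : t.prod = l[(i:Nat)] * l[(j:Nat)] * l[(k:Nat)] := by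
    rw [← hperm.prod_eq, hmap]
    simp [mul_assoc]
  rw [hprod]
  exact mem_ghpProds.mpr ⟨i, j, k, i.isLt, j.isLt, k.isLt,
    Nat.ne_of_lt hij, Nat.ne_of_lt hik, Nat.ne_of_lt hjk, rfl⟩

theorem mem_ghpProds_subperm {l : List Int} {v : Int} (h : v ∈ ghpProds l) :
    ∃ t : List Int, t.Subperm l ∧ t.length = 3 ∧ t.prod = v := by
  obtain ⟨x, y, z, hx, hy, hz, hxy, hxz, hyz, rfl⟩ := mem_ghpProds.mp h
  have mk : ∀ (i j k : Nat) (hij : i < j) (hjk : j < k) (hk : k < l.length),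
      ∃ t : List Int, t.Subperm l ∧ t.length = 3 ∧
        t.prod = l[i]'(by omega) * l[j]'(by omega) * l[k] := by
    intro i j k hij hjk hk
    exact ⟨_, (triple_sublist l i j k hij hjk hk).subperm, rfl, by simp [mul_assoc]⟩
  rcases Nat.lt_trichotomy x y with h1 | h1 | h1
  · rcases Nat.lt_trichotomy y z with h2 | h2 | h2
    · exact mk x y z h1 h2 hz
    · omega
    · rcases Nat.lt_trichotomy x z with h3 | h3 | h3
      · obtain ⟨t, ha, hb, hc⟩ := mk x z y h3 h2 hy
        exact ⟨t, ha, hb, by rw [hc]; ring⟩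
      · omega
      · obtain ⟨t, ha, hb, hc⟩ := mk z x y h3 h1 hy
        exact ⟨t, ha, hb, by rw [hc]; ring⟩
  · omega
  · rcases Nat.lt_trichotomy x z with h2 | h2 | h2
    · obtain ⟨t, ha, hb, hc⟩ := mk y x z h1 h2 hz
      exact ⟨t, ha, hb, by rw [hc]; ring⟩
    · omega
    · rcases Nat.lt_trichotomy y z with h3 | h3 | h3
      · obtain ⟨t, ha, hb, hc⟩ := mk y z x h3 h2 hx
        exact ⟨t, ha, hb, by rw [hc]; ring⟩
      · omega
      · obtain ⟨t, ha, hb, hc⟩ := mk z y x h3 h1 hx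
        exact ⟨t, ha, hb, by rw [hc]; ring⟩

theorem pos_triple_exists (l : List Int)
    (h : 3 ≤ l.countP (fun a => decide (0 < a)) ∨
         (1 ≤ l.countP (fun a => decide (0 < a)) ∧ 2 ≤ l.countP (fun a => decide (a < 0)))) :
    ∃ v ∈ ghpProds l, 0 < v := by
  rcases h with h | ⟨h1, h2⟩
  · set F := l.filter (fun a => decide (0 < a)) with hF
    have hFlen : 3 ≤ F.length := by rwa [List.countP_eq_length_filter] at h
    have hlen3 : (F.take 3).length = 3 := by simp [List.length_take]; omega
    obtain ⟨a, b, c, habc⟩ := List.length_eq_three.mp hlen3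
    have hsub : (F.take 3).Sublist l := (List.take_sublist 3 F).trans List.filter_sublist
    have hmemF : ∀ w ∈ F.take 3, 0 < w := by
      intro w hw
      have := (List.take_sublist 3 F).mem hw  -- w ∈ F  (name?)
      have := List.mem_filter.mp this
      simpa using this.2
    have hprod : 0 < (F.take 3).prod := by
      rw [habc]
      have ha := hmemF a (by rw [habc]; simp)
      have hb := hmemF b (by rw [habc]; simp)
      have hc := hmemF c (by rw [habc]; simp)
      simp only [List.prod_cons, List.prod_nil, mul_one]
      positivity
    exact ⟨(F.take 3).prod, subperm_prod_mem hsub.subperm hlen3, hprod⟩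
  · set Fp := l.filter (fun a => decide (0 < a)) with hFp
    set Fn := l.filter (fun a => decide (a < 0)) with hFn
    have hp : 1 ≤ Fp.length := by rwa [List.countP_eq_length_filter] at h1
    have hn : 2 ≤ Fn.length := by rwa [List.countP_eq_length_filter] at h2
    have hp1 : (Fp.take 1).length = 1 := by simp [List.length_take]; omega
    have hn2 : (Fn.take 2).length = 2 := by simp [List.length_take]; omega
    obtain ⟨p0, hp0⟩ := List.length_eq_one_iff.mp hp1
    obtain ⟨n1, n2, hn12⟩ := List.length_eq_two.mp hn2
    have hp0pos : 0 < p0 := by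
      have : p0 ∈ Fp := (List.take_sublist 1 Fp).mem (by rw [hp0]; simp)
      simpa using (List.mem_filter.mp this).2
    have hn1neg : n1 < 0 := by
      have : n1 ∈ Fn := (List.take_sublist 2 Fn).mem (by rw [hn12]; simp)
      simpa using (List.mem_filter.mp this).2
    have hn2neg : n2 < 0 := by
      have : n2 ∈ Fn := (List.take_sublist 2 Fn).mem (by rw [hn12]; simp)
      simpa using (List.mem_filter.mp this).2
    have hsubp : ([n1, n2, p0] : List Int).Subperm l := by
      rw [List.subperm_ext_iff]
      intro w hw
      have hsign : w < 0 ∨ 0 < w := by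
        simp only [List.mem_cons, List.not_mem_nil, or_false] at hw
        rcases hw with rfl | rfl | rfl
        · exact Or.inl hn1neg
        · exact Or.inl hn2neg
        · exact Or.inr hp0pos
      rcases hsign with hsw | hsw
      · calc List.count w [n1, n2, p0] = List.count w (Fn.take 2) := by
              rw [hn12]
              simp only [List.count_cons, List.count_nil, beq_iff_eq]
              split_ifs <;> omega
          _ ≤ List.count w Fn := List.Sublist.count_le _ (List.take_sublist 2 Fn)
          _ ≤ List.count w l := List.Sublist.count_le _ List.filter_sublist
      · calc List.count w [n1, n2, p0] = List.count w (Fp.take 1) := by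
              rw [hp0]
              simp only [List.count_cons, List.count_nil, beq_iff_eq]
              split_ifs <;> omega
          _ ≤ List.count w Fp := List.Sublist.count_le _ (List.take_sublist 1 Fp)
          _ ≤ List.count w l := List.Sublist.count_le _ List.filter_sublist
    have hprod : (0:Int) < ([n1, n2, p0] : List Int).prod := by
      have h := mul_pos (mul_pos_of_neg_of_neg hn1neg hn2neg) hp0pos
      rw [mul_assoc] at h
      simpa using h
    exact ⟨_, subperm_prod_mem hsubp rfl, hprod⟩

theorem arith_bound (p q X Y Z a b c : Int)
    (hpq : p ≤ q) (hqY : q ≤ Y) (hXY : X ≤ Y) (hYZ : Y ≤ Z)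
    (hpa : p ≤ a) (haX : a ≤ X) (hqb : q ≤ b) (hbY : b ≤ Y)
    (hab : a ≤ b) (hbc : b ≤ c) (hcZ : c ≤ Z)
    (hside : q ≤ X ∨ (a = p ∧ b = q ∧ c = Z ∧ X = p ∧ Y = q)) :
    a * b * c ≤ max (X * Y * Z) (p * q * Z) := by
  rcases hside with hqX | ⟨rfl, rfl, rfl, hXp, hYq⟩
  · rcases le_or_gt 0 a with ha | ha
    · -- all three nonnegative
      refine le_max_of_le_left ?_
      have hb0 : 0 ≤ b := le_trans ha hab
      have hc0 : 0 ≤ c := le_trans hb0 hbc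
      have h1 : a * b ≤ X * Y := mul_le_mul haX hbY hb0 (le_trans ha haX)
      calc a * b * c ≤ X * Y * c := mul_le_mul_of_nonneg_right h1 hc0
        _ ≤ X * Y * Z := mul_le_mul_of_nonneg_left hcZ
              (mul_nonneg (le_trans ha haX) (le_trans hb0 hbY))
    · rcases le_or_gt 0 b with hb | hb
      · -- a < 0 ≤ b ≤ c : product ≤ 0
        have habc : a * b * c ≤ 0 := by
          have hc0 : 0 ≤ c := le_trans hb hbc
          have : a * b ≤ 0 := mul_nonpos_of_nonpos_of_nonneg (le_of_lt ha) hb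
          exact mul_nonpos_of_nonpos_of_nonneg this hc0
        rcases le_or_gt q 0 with hq | hq
        · refine le_max_of_le_right (le_trans habc ?_)
          have hp0 : p < 0 := lt_of_le_of_lt hpa ha
          have hpq0 : 0 ≤ p * q := mul_nonneg_of_nonpos_of_nonpos (le_of_lt hp0) hq
          have hZ0 : 0 ≤ Z := le_trans (le_trans hb hbc) hcZ
          exact mul_nonneg hpq0 hZ0
        · refine le_max_of_le_left (le_trans habc ?_)
          have hX0 : 0 < X := lt_of_lt_of_le hq hqX
          have hY0 : 0 < Y := lt_of_lt_of_le hq hqY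
          have hZ0 : 0 < Z := lt_of_lt_of_le hY0 hYZ
          positivity
      · rcases le_or_gt 0 c with hc | hc
        · -- a,b < 0 ≤ c
          refine le_max_of_le_right ?_
          have hp0 : p < 0 := lt_of_le_of_lt hpa ha
          have hq0 : q < 0 := lt_of_le_of_lt hqb hb
          have hab_pq : a * b ≤ p * q := by nlinarith
          have hab0 : 0 ≤ a * b := mul_nonneg_of_nonpos_of_nonpos (le_of_lt ha) (le_of_lt hb)
          calc a * b * c ≤ p * q * c := mul_le_mul_of_nonneg_right hab_pq hc
            _ ≤ p * q * Z := by nlinarith [mul_nonneg_of_nonpos_of_nonpos (le_of_lt hp0) (le_of_lt hq0)]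
        · -- all three negative
          rcases le_or_gt 0 Z with hZ | hZ
          · refine le_max_of_le_right ?_
            have hp0 : p < 0 := lt_of_le_of_lt hpa ha
            have hq0 : q < 0 := lt_of_le_of_lt hqb hb
            have habc : a * b * c ≤ 0 :=
              le_of_lt (mul_neg_of_pos_of_neg (mul_pos_of_neg_of_neg ha hb) hc)
            have : 0 ≤ p * q * Z :=
              mul_nonneg (mul_nonneg_of_nonpos_of_nonpos (le_of_lt hp0) (le_of_lt hq0)) hZ
            linarith
          · refine le_max_of_le_left ?_
            have hX0 : X < 0 := by linarith
            have hY0 : Y < 0 := by linarith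
            have hXY_ab : X * Y ≤ a * b := by nlinarith
            have hab0 : 0 ≤ a * b := by nlinarith
            calc a * b * c ≤ a * b * Z := mul_le_mul_of_nonneg_left hcZ hab0
              _ ≤ X * Y * Z := by nlinarith
  · refine le_max_of_le_right ?_
    nlinarith [hXp, hYq]

theorem alt_eq (l : List Int) (hn : 3 ≤ l.length) (m : Int)
    (hmem : m ∈ ghpProds l) (hub : ∀ v ∈ ghpProds l, v ≤ m) :
    get_highest_product_alt l = some m := by
  unfold get_highest_product_alt
  rw [if_neg (by omega)]
  set s := PySem.List.sorted l (fun x => x) false with hs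
  have hlen : s.length = l.length := PySem.List.length_sorted l _ false
  have hns : 3 ≤ s.length := by omega
  have hperm : s.Perm l := PySem.List.sorted_perm l _ false
  have hpw : s.Pairwise (fun a b => a ≤ b) := PySem.List.sorted_pairwise l (fun x => x)
  have hmono : ∀ (i j : Nat) (hij : i ≤ j) (hj : j < s.length), s[i]'(by omega) ≤ s[j] := by
    intro i j hij hj
    rcases Nat.eq_or_lt_of_le hij with rfl | hlt
    · exact le_refl _
    · exact List.pairwise_iff_getElem.mp hpw i j (by omega) hj hlt
  show some (max (PySem.List.pyGetD s (-1) 0 * PySem.List.pyGetD s (-2) 0 * PySem.List.pyGetD s (-3) 0)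
      (PySem.List.pyGetD s 0 0 * PySem.List.pyGetD s 1 0 * PySem.List.pyGetD s (-1) 0)) = some m
  rw [PySem.List.pyGetD_neg_ofNat s 1 0 (by omega) (by omega),
      PySem.List.pyGetD_neg_ofNat s 2 0 (by omega) (by omega),
      PySem.List.pyGetD_neg_ofNat s 3 0 (by omega) (by omega),
      PySem.List.pyGetD_eq_getElem s (i := 0) 0 (by omega) (by omega),
      PySem.List.pyGetD_eq_getElem s (i := 1) 0 (by omega) (by omega)]
  simp only [Int.toNat_zero, Int.toNat_one]
  refine congrArg some (le_antisymm (max_le ?_ ?_) ?_)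
  · -- s[n-1]*s[n-2]*s[n-3] ≤ m
    have hsub : [s[s.length-3]'(by omega), s[s.length-2]'(by omega), s[s.length-1]'(by omega)].Sublist s :=
      triple_sublist s _ _ _ (by omega) (by omega) (by omega)
    have hle := hub _ (subperm_prod_mem (hsub.subperm.trans hperm.subperm) rfl)
    calc s[s.length-1]'(by omega) * s[s.length-2]'(by omega) * s[s.length-3]'(by omega)
        = [s[s.length-3]'(by omega), s[s.length-2]'(by omega), s[s.length-1]'(by omega)].prod := by
          simp; ring
      _ ≤ m := hle
  · -- s[0]*s[1]*s[n-1] ≤ m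
    have hsub : [s[0]'(by omega), s[1]'(by omega), s[s.length-1]'(by omega)].Sublist s :=
      triple_sublist s 0 1 (s.length-1) (by omega) (by omega) (by omega)
    have hle := hub _ (subperm_prod_mem (hsub.subperm.trans hperm.subperm) rfl)
    calc s[0]'(by omega) * s[1]'(by omega) * s[s.length-1]'(by omega)
        = [s[0]'(by omega), s[1]'(by omega), s[s.length-1]'(by omega)].prod := by simp; ring
      _ ≤ m := hle
  · -- m ≤ max
    obtain ⟨t, hsp, hlen3, hprod⟩ := mem_ghpProds_subperm hmem
    have hsp' : t.Subperm s := hsp.trans hperm.symm.subperm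
    obtain ⟨t', hperm', hsub'⟩ := hsp'
    obtain ⟨is, hmap, hpw'⟩ := List.sublist_eq_map_getElem hsub'
    have hislen : is.length = 3 := by
      have := congrArg List.length hmap
      simp only [List.length_map] at this
      have : t'.length = 3 := by rw [hperm'.length_eq, hlen3]
      omega
    obtain ⟨i, j, k, rfl⟩ := List.length_eq_three.mp hislen
    rw [List.pairwise_cons, List.pairwise_cons] at hpw'
    have hij : (i : Nat) < (j : Nat) := hpw'.1 j (by simp)
    have hik : (i : Nat) < (k : Nat) := hpw'.1 k (by simp)
    have hjk : (j : Nat) < (k : Nat) := hpw'.2.1 k (by simp)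
    have hm : m = s[(i:Nat)] * s[(j:Nat)] * s[(k:Nat)] := by
      rw [← hprod, ← hperm'.prod_eq, hmap]
      simp [mul_assoc]
    rw [hm]
    have hbound := arith_bound (s[0]'(by omega)) (s[1]'(by omega))
      (s[s.length-3]'(by omega)) (s[s.length-2]'(by omega)) (s[s.length-1]'(by omega))
      (s[(i:Nat)]) (s[(j:Nat)]) (s[(k:Nat)])
      (hmono 0 1 (by omega) (by omega))
      (hmono 1 (s.length-2) (by omega) (by omega))
      (hmono (s.length-3) (s.length-2) (by omega) (by omega))
      (hmono (s.length-2) (s.length-1) (by omega) (by omega))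
      (hmono 0 i (by omega) (by omega))
      (hmono i (s.length-3) (by omega) (by omega))
      (hmono 1 j (by omega) (by omega))
      (hmono j (s.length-2) (by omega) (by omega))
      (hmono i j (by omega) (by omega))
      (hmono j k (by omega) (by omega))
      (hmono k (s.length-1) (by omega) (by omega))
      ?side
    · calc s[(i:Nat)] * s[(j:Nat)] * s[(k:Nat)]
          ≤ max (s[s.length-3]'(by omega) * s[s.length-2]'(by omega) * s[s.length-1]'(by omega))
                (s[0]'(by omega) * s[1]'(by omega) * s[s.length-1]'(by omega)) := hbound
        _ = max (s[s.length-1]'(by omega) * s[s.length-2]'(by omega) * s[s.length-3]'(by omega))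
                (s[0]'(by omega) * s[1]'(by omega) * s[s.length-1]'(by omega)) := by
              rw [show s[s.length-3]'(by omega) * s[s.length-2]'(by omega) * s[s.length-1]'(by omega)
                  = s[s.length-1]'(by omega) * s[s.length-2]'(by omega) * s[s.length-3]'(by omega) from by ring]
    case side =>
      by_cases h4 : 4 ≤ s.length
      · exact Or.inl (hmono 1 (s.length-3) (by omega) (by omega))
      · refine Or.inr ⟨?_, ?_, ?_, ?_, ?_⟩ <;>
          · congr 1 <;> omega

theorem no_pos_of_counts (l : List Int)
    (hc1 : l.countP (fun a => decide (0 < a)) < 3)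
    (hc2 : l.countP (fun a => decide (0 < a)) = 0 ∨ l.countP (fun a => decide (a < 0)) < 2) :
    ∀ v ∈ ghpProds l, v ≤ 0 := by
  intro v hv
  by_contra hpos
  push_neg at hpos
  obtain ⟨t, hsp, hlen3, hprod⟩ := mem_ghpProds_subperm hv
  obtain ⟨α, β, γ, rfl⟩ := List.length_eq_three.mp hlen3
  have he : α * β * γ = v := by simpa [mul_assoc] using hprod
  have hv3 : 0 < α * β * γ := he ▸ hpos
  have hcp := List.Subperm.countP_le (fun a => decide (0 < a)) hsp
  have hcn := List.Subperm.countP_le (fun a => decide (a < 0)) hsp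
  simp only [List.countP_cons, List.countP_nil, decide_eq_true_eq] at hcp hcn
  rcases lt_trichotomy α 0 with hα | hα | hα <;>
    rcases lt_trichotomy β 0 with hβ | hβ | hβ <;>
      rcases lt_trichotomy γ 0 with hγ | hγ | hγ <;>
        first
          | (subst_vars; nlinarith)
          | nlinarith
          | nlinarith [mul_pos_of_neg_of_neg hα hβ]
          | nlinarith [mul_pos hβ hγ]
          | nlinarith [mul_pos_of_neg_of_neg hβ hγ]
          | nlinarith [mul_pos_of_neg_of_neg hα hγ]
          | nlinarith [mul_pos hα hβ]
          | nlinarith [mul_pos hα hγ]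
          | (split_ifs at hcp hcn <;> omega)

theorem ghpUpd_foldl_neg_last (u : List Int) (w : Int) (hw : w < 0)
    (hall : ∀ p ∈ u, p ≤ 0) :
    ∃ r : Int, (u ++ [w]).foldl ghpUpd none = some r ∧ r < 0 := by
  rw [List.foldl_append]
  rcases h : u.foldl ghpUpd none with _ | v
  · exact ⟨w, rfl, hw⟩
  · have hv : v ≤ 0 := by
      rcases ghpUpd_foldl_mem u none v h with h' | h'
      · simp at h'
      · exact hall v h'
    simp only [List.foldl_cons, List.foldl_nil]
    have hdef : ghpUpd (some v) w = if v = 0 ∨ w > v then some w else some v := rfl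
    rw [hdef]
    split_ifs with hc
    · exact ⟨w, rfl, hw⟩
    · push_neg at hc
      exact ⟨v, rfl, lt_of_le_of_ne hv hc.1⟩

-- ===== VERDICT =====
theorem get_highest_product_spec : Claim_unchanged_get_highest_product := by
  intro l _
  unfold Spec_get_highest_product
  intro hD
  by_cases hn : 3 ≤ l.length
  · have hne : ghpProds l ≠ [] := by
      have h012 : l[0]'(by omega) * l[1]'(by omega) * l[2]'(by omega) ∈ ghpProds l :=
        mem_ghpProds.mpr ⟨0, 1, 2, by omega, by omega, by omega,
          by omega, by omega, by omega, rfl⟩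
      exact List.ne_nil_of_mem h012
    obtain ⟨p, rest, hP⟩ := List.exists_cons_of_ne_nil hne
    have hub : ∀ v ∈ ghpProds l, v ≤ rest.foldl max p := by
      rw [hP]; intro v hv
      rcases List.mem_cons.mp hv with rfl | hv'
      · exact (PySem.List.le_foldl_max rest v).1
      · exact (PySem.List.le_foldl_max rest p).2 v hv'
    have hmem : rest.foldl max p ∈ ghpProds l := by
      rw [hP]; exact List.max?_mem (xs := p :: rest) rfl
    have hA : get_highest_product l = some (rest.foldl max p) := by
      rw [ghp_eq_foldl, hP]
      by_cases hMpos : 0 < rest.foldl max p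
      · rw [List.foldl_cons]
        exact ghpUpd_foldl_pos rest p hMpos
      · push_neg at hMpos
        by_cases h0 : (0 : Int) ∈ ghpProds l
        · have hM0 : rest.foldl max p = 0 := le_antisymm hMpos (hub 0 h0)
          have h0l : (0 : Int) ∈ l := by
            obtain ⟨x, y, z, hx, hy, hz, _, _, _, hv⟩ := mem_ghpProds.mp h0
            rcases mul_eq_zero.mp hv.symm with h' | h'
            · rcases mul_eq_zero.mp h' with h'' | h''
              · exact h'' ▸ List.getElem_mem hx
              · exact h'' ▸ List.getElem_mem hy
            · exact h' ▸ List.getElem_mem hz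
          have hc1 : l.countP (fun a => decide (0 < a)) < 3 := by
            by_contra hc
            obtain ⟨v, hvmem, hvpos⟩ := pos_triple_exists l (Or.inl (by omega))
            have := hub v hvmem; omega
          have hc2 : l.countP (fun a => decide (0 < a)) = 0 ∨
              l.countP (fun a => decide (a < 0)) < 2 := by
            by_contra hc
            push_neg at hc
            obtain ⟨v, hvmem, hvpos⟩ := pos_triple_exists l (Or.inr ⟨by omega, by omega⟩)
            have := hub v hvmem; omega
          have hlast : (0 : Int) ∈ l.drop (l.length - 3) := by
            by_contra hh
            exact hD ⟨hn, h0l, hc1, hc2, hh⟩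
          have hdlen : (l.drop (l.length - 3)).length = 3 := by
            simp [List.length_drop]; omega
          obtain ⟨a, b, c, habc⟩ := List.length_eq_three.mp hdlen
          have hl : l = l.take (l.length - 3) ++ [a, b, c] := by
            rw [← habc, List.take_append_drop]
          have hzero : c * b * a = 0 := by
            rw [habc] at hlast
            simp only [List.mem_cons, List.not_mem_nil, or_false] at hlast
            rcases hlast with h' | h' | h' <;> rw [← h'] <;> ring
          have hgl : (ghpProds l).getLast? = some 0 := by
            conv_lhs => rw [hl]
            rw [ghpProds_getLast, hzero]
          obtain ⟨u, hu⟩ := List.getLast?_eq_some_iff.mp hgl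
          rw [← hP, hu, ghpUpd_foldl_zero_last u (fun w hw => by
            have hwP : w ∈ ghpProds l := by
              rw [hu]; exact List.mem_append_left _ hw
            have := hub w hwP; omega), hM0]
        · have hallneg : ∀ v ∈ ghpProds l, v < 0 := fun v hv =>
            lt_of_le_of_ne (le_trans (hub v hv) hMpos) (fun h => h0 (h ▸ hv))
          rw [List.foldl_cons]
          exact ghpUpd_foldl_neg rest p (hallneg p (by rw [hP]; simp))
            (fun w hw => hallneg w (by rw [hP]; simp [hw]))
    rw [hA, alt_eq l hn (rest.foldl max p) hmem hub]
  · have hPnil : ghpProds l = [] := by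
      rw [List.eq_nil_iff_forall_not_mem]
      intro v hv
      obtain ⟨x, y, z, hx, hy, hz, h1, h2, h3, _⟩ := mem_ghpProds.mp hv
      omega
    rw [ghp_eq_foldl, hPnil]
    unfold get_highest_product_alt
    rw [if_pos (by omega)]
    rfl

theorem get_highest_product_changed : Claim_changed_get_highest_product := by
  unfold Claim_changed_get_highest_product; decide

theorem get_highest_product_tight : Claim_exact_get_highest_product := by
  intro l _ hD
  obtain ⟨hn, h0l, hc1, hc2, hlast⟩ := hD
  have hub0 : ∀ v ∈ ghpProds l, v ≤ 0 := no_pos_of_counts l hc1 hc2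
  -- 0 is a product: the zero sits before the last three elements
  obtain ⟨i, hi, hiv⟩ := List.getElem_of_mem h0l
  have hi3 : i < l.length - 3 := by
    by_contra hge
    push_neg at hge
    have : (0 : Int) ∈ l.drop (l.length - 3) := by
      have : (l.drop (l.length - 3))[i - (l.length - 3)]'(by simp [List.length_drop]; omega) = l[i]'hi := by
        rw [List.getElem_drop]
        congr 1
        omega
      rw [← hiv, ← this]
      exact List.getElem_mem _
    exact hlast this
  have h0P : (0 : Int) ∈ ghpProds l :=
    mem_ghpProds.mpr ⟨i, l.length - 2, l.length - 1, by omega, by omega, by omega,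
      by omega, by omega, by omega, by rw [hiv]; ring⟩
  have hB : get_highest_product_alt l = some 0 := alt_eq l hn 0 h0P hub0
  -- decompose l and compute A
  have hdlen : (l.drop (l.length - 3)).length = 3 := by
    simp [List.length_drop]; omega
  obtain ⟨a, b, c, habc⟩ := List.length_eq_three.mp hdlen
  have hl : l = l.take (l.length - 3) ++ [a, b, c] := by
    rw [← habc, List.take_append_drop]
  have hanz : a ≠ 0 ∧ b ≠ 0 ∧ c ≠ 0 := by
    rw [habc] at hlast
    simp only [List.mem_cons, List.not_mem_nil, or_false] at hlast
    push_neg at hlast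
    exact ⟨fun h => hlast.1 h.symm, fun h => hlast.2.1 h.symm, fun h => hlast.2.2 h.symm⟩
  have hgl : (ghpProds l).getLast? = some (c * b * a) := by
    conv_lhs => rw [hl]
    exact ghpProds_getLast _ a b c
  obtain ⟨u, hu⟩ := List.getLast?_eq_some_iff.mp hgl
  have hcba : c * b * a < 0 := by
    have hmem : c * b * a ∈ ghpProds l := by
      rw [hu]; exact List.mem_append_right _ (by simp)
    exact lt_of_le_of_ne (hub0 _ hmem) (mul_ne_zero (mul_ne_zero hanz.2.2 hanz.2.1) hanz.1)
  obtain ⟨r, hr, hrneg⟩ := ghpUpd_foldl_neg_last u (c * b * a) hcba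
    (fun w hw => hub0 w (by rw [hu]; exact List.mem_append_left _ hw))
  have hA : get_highest_product l = some r := by
    rw [ghp_eq_foldl, hu, hr]
  rw [hA, hB]
  simp
  omega
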